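-- pv_equiv track=rewrite | github.com/applingo/Scripts | asligand.py | int_to_base34
-- ===== SOURCE A (Python) =====
-- BASE34 = "0123456789ABCDEFGHJKLMNPQRSTUVWXYZ"  # 全34文字
--
-- def int_to_base34(n):
--     """
--     1から始まる番号nを、34進数の2桁文字列に変換する関数
--     例：1 -> "01", 2 -> "02", 34 -> "10"
--     """
--     if n < 0:
--         raise ValueError("n must be non-negative")
--     digits = []
--     temp = n
--     while temp:
--         temp, r = divmod(temp, 34)
--         digits.append(BASE34[r])
--     if not digits:
--         digits.append("0")
--     result = ''.join(reversed(digits))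
--     # 桁数が足りなければ先頭に0を付加（必ず2桁になるように）
--     if len(result) < 2:
--         result = "0" + result
--     return result[-2:]
-- ===== SOURCE B (Python) =====
-- BASE34 = "0123456789ABCDEFGHJKLMNPQRSTUVWXYZ"
--
-- def int_to_base34(n):
--     if n < 0:
--         raise ValueError("n must be non-negative")
--     return BASE34[(n // 34) % 34] + BASE34[n % 34]
-- ===== Notes on version B (the rewrite author's own statement) =====
-- stated objective: simpler
-- what changed: Replaces the divmod while-loop, list reversal, zero-padding and [-2:] truncation with a direct closed-form computation of the two base-34 digits ((n//34)%34 and n%34).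
import Mathlib
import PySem

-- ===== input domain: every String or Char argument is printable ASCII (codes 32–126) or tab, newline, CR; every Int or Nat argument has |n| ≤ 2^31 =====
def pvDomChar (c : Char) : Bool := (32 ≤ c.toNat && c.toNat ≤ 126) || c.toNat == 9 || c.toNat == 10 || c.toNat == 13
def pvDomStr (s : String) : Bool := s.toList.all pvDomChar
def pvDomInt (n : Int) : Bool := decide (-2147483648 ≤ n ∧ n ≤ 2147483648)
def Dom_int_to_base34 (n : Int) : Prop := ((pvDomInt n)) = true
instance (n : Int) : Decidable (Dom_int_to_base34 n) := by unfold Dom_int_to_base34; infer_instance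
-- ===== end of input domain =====

-- B replaces A's divmod loop / reverse / pad / truncate by the closed-form two base-34 digits (n//34)%34 and n%34; objective: simpler.
-- Both Pythons raise ValueError for n < 0 (excluded by Pre_).

-- ===== PORT A =====
def pvBASE34 : List Char := "0123456789ABCDEFGHJKLMNPQRSTUVWXYZ".toList

-- the 'while temp:' loop; for n < 0 Python already raised before the loop (outside Pre_),
-- so the loop is only ever entered with temp > 0 and we recurse on that condition
def pvLoopA (temp : Int) (digits : List Char) : List Char :=
  if _h : 0 < temp then
    pvLoopA (PySem.Int.floordiv temp 34)
      (digits ++ [PySem.List.pyGetD pvBASE34 (PySem.Int.mod temp 34) '0'])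
  else digits
termination_by temp.toNat
decreasing_by
  rw [PySem.Int.floordiv_eq_ediv_of_pos (by omega : (0:Int) < 34)]
  omega

def int_to_base34 (n : Int) : String :=
  -- 'if n < 0: raise ValueError' — excluded by Pre_; the port returns "" there
  if n < 0 then "" else
  let digits := pvLoopA n []
  let digits := if digits.isEmpty then ['0'] else digits
  let result := digits.reverse
  let result := if result.length < 2 then '0' :: result else result
  String.ofList (PySem.List.slice result (some (-2)) none)

-- ===== PORT B =====
def int_to_base34_alt (n : Int) : String :=
  -- 'if n < 0: raise ValueError' — excluded by Pre_; the port returns "" there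
  if n < 0 then "" else
  String.ofList [PySem.List.pyGetD pvBASE34 (PySem.Int.mod (PySem.Int.floordiv n 34) 34) '0',
             PySem.List.pyGetD pvBASE34 (PySem.Int.mod n 34) '0']

-- ===== PRECONDITION & SPEC =====
-- A (and B) raise ValueError exactly when n < 0
def Pre_int_to_base34 (n : Int) : Prop := 0 ≤ n
instance (n : Int) : Decidable (Pre_int_to_base34 n) := by unfold Pre_int_to_base34; infer_instance
def pvWitness_int_to_base34 : Int := (5)

def Spec_int_to_base34 (n : Int) (out : String) : Prop := out = int_to_base34_alt n
instance (n : Int) (out : String) : Decidable (Spec_int_to_base34 n out) := by unfold Spec_int_to_base34; infer_instance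

-- ===== CLAIM (what is proved, stated in full; the proofs are below) =====
def Claim_equal_int_to_base34 : Prop := ∀ (n : Int), Dom_int_to_base34 n → Pre_int_to_base34 n → Spec_int_to_base34 n (int_to_base34 n)

-- ===== LEMMAS AND PROOFS =====

lemma pvLoopA_nonpos (temp : Int) (h : ¬ 0 < temp) : pvLoopA temp [] = [] := by
  rw [pvLoopA]; simp [h]

lemma pvLoopA_acc_aux : ∀ (k : Nat) (temp : Int), temp.toNat ≤ k → ∀ acc, pvLoopA temp acc = acc ++ pvLoopA temp [] := by
  intro k
  induction k with
  | zero =>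
    intro temp h acc
    have hnp : ¬ 0 < temp := by omega
    rw [pvLoopA, pvLoopA_nonpos temp hnp]
    simp [hnp]
  | succ k ih =>
    intro temp h acc
    by_cases hp : 0 < temp
    · have hlt : (PySem.Int.floordiv temp 34).toNat ≤ k := by
        rw [PySem.Int.floordiv_eq_ediv_of_pos (by omega : (0:Int) < 34)]
        omega
      rw [pvLoopA]
      conv_rhs => rw [pvLoopA]
      simp only [hp, dif_pos, List.nil_append]
      rw [ih _ hlt, ih _ hlt ([PySem.List.pyGetD pvBASE34 (PySem.Int.mod temp 34) '0'])]
      simp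
    · rw [pvLoopA, pvLoopA_nonpos temp hp]
      simp [hp]

lemma pvLoopA_pos (temp : Int) (h : 0 < temp) :
    pvLoopA temp [] =
      PySem.List.pyGetD pvBASE34 (PySem.Int.mod temp 34) '0' ::
        pvLoopA (PySem.Int.floordiv temp 34) [] := by
  rw [pvLoopA]
  simp only [h, dif_pos, List.nil_append]
  rw [pvLoopA_acc_aux (PySem.Int.floordiv temp 34).toNat _ le_rfl]
  rfl

-- ===== VERDICT (by name: the statement is the Claim_ definition above) =====
theorem int_to_base34_spec : Claim_equal_int_to_base34 := by
  intro n _ hpre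
  unfold Spec_int_to_base34 int_to_base34 int_to_base34_alt
  have hn : ¬ n < 0 := by exact not_lt.mpr hpre
  simp only [hn, if_false]
  by_cases h0 : 0 < n
  · by_cases hq : 0 < PySem.Int.floordiv n 34
    · -- at least two digits: no padding, last two of the reverse
      rw [pvLoopA_pos n h0, pvLoopA_pos _ hq]
      set rest := pvLoopA (PySem.Int.floordiv (PySem.Int.floordiv n 34) 34) [] with hrest
      set a := PySem.List.pyGetD pvBASE34 (PySem.Int.mod (PySem.Int.floordiv n 34) 34) '0'
      set b := PySem.List.pyGetD pvBASE34 (PySem.Int.mod n 34) '0'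
      simp only [List.isEmpty_cons, if_false, Bool.false_eq_true]
      have hrev : (b :: a :: rest).reverse = rest.reverse ++ [a, b] := by simp
      rw [hrev]
      have hlen : ¬ (rest.reverse ++ [a, b]).length < 2 := by simp
      simp only [hlen, if_false]
      rw [PySem.List.slice_from_neg_ofNat _ 2 (by omega)]
      have : (rest.reverse ++ [a, b]).length - 2 = rest.reverse.length + 0 := by simp
      rw [this, List.drop_append]
      refine congrArg String.ofList ?_
      simp [List.drop_eq_nil_of_le]
    · -- exactly one digit: padded with a leading '0', and (n//34)%34 = 0
      rw [pvLoopA_pos n h0, pvLoopA_nonpos _ hq]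
      have hq0 : PySem.Int.floordiv n 34 = 0 := by
        rw [PySem.Int.floordiv_eq_ediv_of_pos (by omega : (0:Int) < 34)] at hq ⊢
        omega
      rw [hq0]
      simp only [List.isEmpty_cons, Bool.false_eq_true, if_false, List.reverse_cons,
        List.reverse_nil, List.nil_append, List.length_cons, List.length_nil]
      have h01 : (1 : Nat) < 2 := by omega
      simp only [h01, if_true]
      rw [PySem.List.slice_from_neg_ofNat _ 2 (by omega)]
      refine congrArg String.ofList ?_
      have : PySem.List.pyGetD pvBASE34 (PySem.Int.mod 0 34) '0' = '0' := by decide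
      simp [PySem.List.pyGetD] at this ⊢
      simp [this]
  · have : n = 0 := by omega
    subst this
    rw [pvLoopA_nonpos 0 (by omega)]
    refine congrArg String.ofList ?_
    decide
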